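-- pv_equiv track=rewrite | github.com/gmhorn/euler | p75.py | coprime_gen
-- ===== SOURCE A (Python) =====
-- def coprime_gen(n):
--     """ Yields all relatively prime pairs (a, b) with b < a <= n. """
--     def _coprime_gen(n, a=1, b=1):
--         # the actual generating function. We don't use directly because
--         # the first tuple is (1,1) which voilate b < a.
--         yield (a, b)
--         k = 1
--         while a*k + b <= n:
--             for coprimes in _coprime_gen(n, a*k+b, a):
--                 yield coprimes
--             k += 1
--     # Skip the first item which is always (1,1)
--     cg = _coprime_gen(n)
--     next(cg)
--     for pair in cg:
--         yield pair
-- ===== SOURCE B (Python) =====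
-- def coprime_gen(n):
--     """ Yields all relatively prime pairs (a, b) with b < a <= n. """
--     stack = [(1, 1)]
--     first = True
--     while stack:
--         a, b = stack.pop()
--         if first:
--             first = False
--         else:
--             yield (a, b)
--         children = []
--         k = 1
--         while a * k + b <= n:
--             children.append((a * k + b, a))
--             k += 1
--         stack.extend(reversed(children))
-- ===== Notes on version B (the rewrite author's own statement) =====
-- stated objective: alternative
-- what changed: Replaces the nested recursive generators (each pair re-yielded up the whole generator chain) by a single iterative loop over an explicit stack that pops a node, yields it (skipping the initial (1,1)), and pushes its children in reverse order, reproducing the identical pre-order.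
import Mathlib
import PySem

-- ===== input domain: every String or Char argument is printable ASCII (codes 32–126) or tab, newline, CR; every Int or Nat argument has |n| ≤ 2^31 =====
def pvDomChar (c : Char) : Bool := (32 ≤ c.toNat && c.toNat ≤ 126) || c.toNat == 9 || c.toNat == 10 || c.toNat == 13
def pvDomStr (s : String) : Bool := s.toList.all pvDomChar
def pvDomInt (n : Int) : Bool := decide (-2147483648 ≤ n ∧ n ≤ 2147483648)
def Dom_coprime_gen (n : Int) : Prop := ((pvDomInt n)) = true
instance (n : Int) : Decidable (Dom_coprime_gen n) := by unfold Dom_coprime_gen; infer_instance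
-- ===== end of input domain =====

-- B replaces A's nested recursive generators by an explicit-stack iterative loop producing the same pre-order (alternative decomposition; return value only, both are generators).

-- ===== PORT A =====
-- A's inner `while a*k+b <= n` loop, forwarding every pair the recursive call yields.
-- Fuel `kf` is a totality guard only: the wrapper passes n.toNat + 2, which exceeds the
-- number of iterations the Python loop performs (the loop exits once a*k+b > n).
def kidsA (rec : Int → Int → List (Int × Int)) (kf : Nat) (n a b k : Int) : List (Int × Int) :=
  match kf with
  | 0 => []
  | kf + 1 =>
      if a * k + b ≤ n then rec (a * k + b) a ++ kidsA rec kf n a b (k + 1)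
      else []

-- A's recursive generator _coprime_gen: yield (a,b), then the k-loop. Fuel bounds the
-- recursion depth; n.toNat + 2 exceeds the depth Python's recursion reaches from (1,1).
def cgA : Nat → Int → Int → Int → List (Int × Int)
  | 0, _, _, _ => []
  | f + 1, n, a, b => (a, b) :: kidsA (fun a' b' => cgA f n a' b') (n.toNat + 2) n a b 1

-- next(cg) skips the first yielded pair (1,1); the rest is returned in order.
def coprime_gen (n : Int) : List (Int × Int) :=
  (cgA (n.toNat + 2) n 1 1).tail

-- ===== PORT B =====
-- B's inner loop collecting the children list [(a*k+b, a) for k = 1, 2, … while a*k+b <= n].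
def childrenB (kf : Nat) (n a b k : Int) : List (Int × Int) :=
  match kf with
  | 0 => []
  | kf + 1 =>
      if a * k + b ≤ n then (a * k + b, a) :: childrenB kf n a b (k + 1)
      else []

-- B's main loop: pop a node (stack top = list head), emit it unless it is the very first,
-- push its children so the k = 1 child is popped next. Fuel bounds the number of
-- iterations (= number of tree nodes); the wrapper passes more than enough.
def bLoop (f : Nat) (n : Int) (stack : List (Int × Int)) (first : Bool)
    (acc : List (Int × Int)) : List (Int × Int) :=
  match f, stack with
  | 0, _ => acc.reverse
  | _ + 1, [] => acc.reverse
  | f + 1, (a, b) :: rest =>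
      let acc' := if first then acc else (a, b) :: acc
      bLoop f n (childrenB (n.toNat + 2) n a b 1 ++ rest) false acc'

def coprime_gen_alt (n : Int) : List (Int × Int) :=
  bLoop ((n.toNat + 2) ^ (n.toNat + 1) + 1) n [(1, 1)] true []

-- ===== PRECONDITION & SPEC =====
def Spec_coprime_gen (n : Int) (out : List (Int × Int)) : Prop := out = coprime_gen_alt n
instance (n : Int) (out : List (Int × Int)) : Decidable (Spec_coprime_gen n out) := by unfold Spec_coprime_gen; infer_instance

-- ===== CLAIM (what is proved, stated in full; the proofs are below) =====
def Claim_equal_coprime_gen : Prop := ∀ (n : Int), Dom_coprime_gen n → Spec_coprime_gen n (coprime_gen n)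

-- ===== LEMMAS AND PROOFS =====

-- The canonical fuel for a node with first component a: enough for the whole subtree.
def bnd (n a : Int) : Nat := (n + 1 - a).toNat + 1

-- The subtree listing at the canonical fuel.
def pre (n a b : Int) : List (Int × Int) := cgA (bnd n a) n a b

-- Weight of a stack, strictly decreasing across one bLoop iteration.
def mu (n : Int) (stack : List (Int × Int)) : Nat :=
  (stack.map (fun p => (n.toNat + 2) ^ ((n + 1 - p.1).toNat))).sum

lemma flatMap_congr_mem {α β : Type} (l : List α) (f g : α → List β)
    (h : ∀ x ∈ l, f x = g x) : l.flatMap f = l.flatMap g := by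
  induction l with
  | nil => rfl
  | cons x xs ih =>
      simp only [List.flatMap_cons]
      rw [h x (by simp), ih (fun y hy => h y (by simp [hy]))]

lemma kidsA_eq_flatMap (rec : Int → Int → List (Int × Int)) (kf : Nat) (n a b : Int) :
    ∀ k, kidsA rec kf n a b k = (childrenB kf n a b k).flatMap (fun p => rec p.1 p.2) := by
  induction kf with
  | zero => intro k; simp [kidsA, childrenB]
  | succ kf ih =>
      intro k
      simp only [kidsA, childrenB]
      split_ifs with h
      · simp [ih (k + 1)]
      · simp

lemma mem_childrenB (kf : Nat) (n a b : Int) (ha : 1 ≤ a) (hb : 1 ≤ b) :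
    ∀ k, 1 ≤ k → ∀ p ∈ childrenB kf n a b k, p.2 = a ∧ a + 1 ≤ p.1 ∧ p.1 ≤ n := by
  induction kf with
  | zero => intro k _ p hp; simp [childrenB] at hp
  | succ kf ih =>
      intro k hk p hp
      simp only [childrenB] at hp
      split_ifs at hp with h
      · rcases List.mem_cons.mp hp with rfl | hp'
        · refine ⟨rfl, ?_, h⟩
          have : a * 1 ≤ a * k := by
            exact mul_le_mul_of_nonneg_left hk (by omega)
          simp at this; omega
        · exact ih (k + 1) (by omega) p hp'
      · simp at hp

lemma childrenB_length (kf : Nat) (n a b : Int) (ha : 1 ≤ a) :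
    ∀ k, (childrenB kf n a b k).length ≤ (n + 1 - (a * k + b)).toNat := by
  induction kf with
  | zero => intro k; simp [childrenB]
  | succ kf ih =>
      intro k
      simp only [childrenB]
      split_ifs with h
      · have h2 := ih (k + 1)
        have : a * (k + 1) + b = a * k + b + a := by ring
        simp only [List.length_cons]
        omega
      · simp

lemma mu_le (n : Int) (l : List (Int × Int)) (e : Nat)
    (h : ∀ p ∈ l, (n + 1 - p.1).toNat ≤ e) :
    mu n l ≤ l.length * (n.toNat + 2) ^ e := by
  induction l with
  | nil => simp [mu]
  | cons x xs ih =>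
      simp only [mu, List.map_cons, List.sum_cons, List.length_cons] at *
      have h1 : (n.toNat + 2) ^ ((n + 1 - x.1).toNat) ≤ (n.toNat + 2) ^ e :=
        Nat.pow_le_pow_right (by omega) (h x (by simp))
      have h2 := ih (fun p hp => h p (by simp [hp]))
      rw [Nat.succ_mul]
      omega

lemma mu_append (n : Int) (l1 l2 : List (Int × Int)) :
    mu n (l1 ++ l2) = mu n l1 + mu n l2 := by
  simp [mu]

-- children weight bound: popping (a,b) and pushing its children strictly decreases mu.
lemma mu_children_lt (n a b : Int) (ha : 1 ≤ a) (hb : 1 ≤ b) :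
    mu n (childrenB (n.toNat + 2) n a b 1) + 1 ≤ (n.toNat + 2) ^ ((n + 1 - a).toNat) := by
  set C := n.toNat + 2 with hC
  by_cases hne : childrenB C n a b 1 = []
  · rw [hne]; simp [mu]
    exact Nat.one_le_two_pow.trans (Nat.pow_le_pow_left (by omega) _)
  · -- children exist, so some child has a+1 ≤ p.1 ≤ n, hence a ≤ n - 1.
    obtain ⟨p, hp⟩ := List.exists_mem_of_ne_nil _ hne
    obtain ⟨_, hp1, hp2⟩ := mem_childrenB C n a b ha hb 1 le_rfl p hp
    have han : a ≤ n - 1 := by omega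
    set m := (n + 1 - a).toNat with hm
    have hm2 : 2 ≤ m := by omega
    have hexp : ∀ q ∈ childrenB C n a b 1, (n + 1 - q.1).toNat ≤ m - 1 := by
      intro q hq
      obtain ⟨_, hq1, hq2⟩ := mem_childrenB C n a b ha hb 1 le_rfl q hq
      omega
    have hlen : (childrenB C n a b 1).length ≤ C - 2 := by
      have := childrenB_length C n a b ha 1
      have : (childrenB C n a b 1).length ≤ (n + 1 - (a * 1 + b)).toNat := this
      simp at this
      omega
    have h1 := mu_le n (childrenB C n a b 1) (m - 1) hexp
    have h2 : mu n (childrenB C n a b 1) ≤ (C - 2) * C ^ (m - 1) :=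
      h1.trans (Nat.mul_le_mul_right _ hlen)
    have hCm : C ^ m = C * C ^ (m - 1) := by
      conv_lhs => rw [show m = (m - 1) + 1 by omega]
      rw [pow_succ]; ring
    have hpow1 : 1 ≤ C ^ (m - 1) := Nat.one_le_pow _ _ (by omega)
    have hCC : C - 2 + 2 = C := by omega
    calc mu n (childrenB C n a b 1) + 1 ≤ (C - 2) * C ^ (m - 1) + 1 := by omega
      _ ≤ (C - 2) * C ^ (m - 1) + 2 * C ^ (m - 1) := by omega
      _ = (C - 2 + 2) * C ^ (m - 1) := by ring
      _ = C ^ m := by rw [hCC, hCm]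
  
-- cgA is fuel-insensitive above the canonical bound.
lemma cgA_stab (n : Int) : ∀ f g a b, 1 ≤ a → 1 ≤ b →
    bnd n a ≤ f → bnd n a ≤ g → cgA f n a b = cgA g n a b := by
  intro f
  induction f with
  | zero => intro g a b _ _ hf _; simp [bnd] at hf
  | succ f ih =>
      intro g a b ha hb hf hg
      obtain ⟨g', rfl⟩ : ∃ g', g = g' + 1 := by
        cases g with
        | zero => simp [bnd] at hg
        | succ g' => exact ⟨g', rfl⟩
      simp only [cgA]
      congr 1
      rw [kidsA_eq_flatMap, kidsA_eq_flatMap]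
      apply flatMap_congr_mem
      intro p hp
      obtain ⟨hp2, hp1, hpn⟩ := mem_childrenB _ n a b ha hb 1 le_rfl p hp
      have hbp : bnd n p.1 ≤ f ∧ bnd n p.1 ≤ g' := by
        simp only [bnd] at *
        omega
      rw [hp2]
      exact ih g' p.1 a (by omega) ha hbp.1 hbp.2

-- one unfolding of the subtree listing at canonical fuel.
lemma pre_unfold (n a b : Int) (ha : 1 ≤ a) (hb : 1 ≤ b) :
    pre n a b = (a, b) :: (childrenB (n.toNat + 2) n a b 1).flatMap (fun p => pre n p.1 p.2) := by
  have h1 : bnd n a = ((n + 1 - a).toNat) + 1 := rfl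
  simp only [pre, h1, cgA]
  congr 1
  rw [kidsA_eq_flatMap]
  apply flatMap_congr_mem
  intro p hp
  obtain ⟨hp2, hp1, hpn⟩ := mem_childrenB _ n a b ha hb 1 le_rfl p hp
  rw [hp2]
  apply cgA_stab n _ _ p.1 a (by omega) ha
  · simp only [bnd]; omega
  · exact le_rfl

-- main invariant of B's loop: with enough fuel it appends the pre-orders of the stack.
lemma bLoop_spec (n : Int) : ∀ f stack acc,
    (∀ p ∈ stack, 1 ≤ p.1 ∧ 1 ≤ p.2) → mu n stack + 1 ≤ f →
    bLoop f n stack false acc = acc.reverse ++ stack.flatMap (fun p => pre n p.1 p.2) := by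
  intro f
  induction f with
  | zero => intro stack acc _ hf; omega
  | succ f ih =>
      intro stack acc hinv hf
      match stack with
      | [] => simp [bLoop]
      | (a, b) :: rest =>
          obtain ⟨ha, hb⟩ := hinv (a, b) (by simp)
          simp only [bLoop, if_neg Bool.false_ne_true]
          have hch := mu_children_lt n a b ha hb
          have hmu : mu n (childrenB (n.toNat + 2) n a b 1 ++ rest) + 1 ≤ f := by
            rw [mu_append]
            have : mu n ((a, b) :: rest) = (n.toNat + 2) ^ ((n + 1 - a).toNat) + mu n rest := by
              simp [mu]
            omega
          have hinv' : ∀ p ∈ childrenB (n.toNat + 2) n a b 1 ++ rest, 1 ≤ p.1 ∧ 1 ≤ p.2 := by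
            intro p hp
            rcases List.mem_append.mp hp with hp' | hp'
            · obtain ⟨hp2, hp1, _⟩ := mem_childrenB _ n a b ha hb 1 le_rfl p hp'
              exact ⟨by omega, by omega⟩
            · exact hinv p (by simp [hp'])
          rw [ih _ _ hinv' hmu]
          simp only [List.flatMap_cons, List.flatMap_append, List.reverse_cons,
            List.append_assoc]
          rw [pre_unfold n a b ha hb]
          simp

-- ===== VERDICT (by name: the statement is the Claim_ definition above) =====
theorem coprime_gen_spec : Claim_equal_coprime_gen := by
  intro n _
  show coprime_gen n = coprime_gen_alt n
  set C := n.toNat + 2 with hC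
  -- A side: the full listing from (1,1) at canonical fuel, minus its head.
  have hA : coprime_gen n = (childrenB C n 1 1 1).flatMap (fun p => pre n p.1 p.2) := by
    unfold coprime_gen
    have h1 : cgA C n 1 1 = pre n 1 1 := by
      apply cgA_stab n C (bnd n 1) 1 1 le_rfl le_rfl
      · simp only [bnd]; omega
      · exact le_rfl
    rw [h1, pre_unfold n 1 1 le_rfl le_rfl]
    rfl
  -- B side: one loop step from the root, then the invariant.
  have hB : coprime_gen_alt n = (childrenB C n 1 1 1).flatMap (fun p => pre n p.1 p.2) := by
    unfold coprime_gen_alt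
    have hstep : bLoop (C ^ (n.toNat + 1) + 1) n [(1, 1)] true []
        = bLoop (C ^ (n.toNat + 1)) n (childrenB C n 1 1 1 ++ []) false [] := rfl
    have hinv : ∀ p ∈ childrenB C n 1 1 1 ++ [], 1 ≤ p.1 ∧ 1 ≤ p.2 := by
      intro p hp
      simp only [List.append_nil] at hp
      obtain ⟨hp2, hp1, _⟩ := mem_childrenB _ n 1 1 le_rfl le_rfl 1 le_rfl p hp
      exact ⟨by omega, by omega⟩
    have hmu : mu n (childrenB C n 1 1 1 ++ []) + 1 ≤ C ^ (n.toNat + 1) := by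
      simp only [List.append_nil]
      have hexp : ∀ p ∈ childrenB C n 1 1 1, (n + 1 - p.1).toNat ≤ n.toNat := by
        intro p hp
        obtain ⟨_, hp1, hp2⟩ := mem_childrenB _ n 1 1 le_rfl le_rfl 1 le_rfl p hp
        omega
      have hlen : (childrenB C n 1 1 1).length ≤ C - 2 := by
        have := childrenB_length C n 1 1 le_rfl 1
        simp at this
        omega
      have h1 := mu_le n (childrenB C n 1 1 1) n.toNat hexp
      have h2 : mu n (childrenB C n 1 1 1) ≤ (C - 2) * C ^ n.toNat :=
        h1.trans (Nat.mul_le_mul_right _ hlen)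
      have h3 : C ^ (n.toNat + 1) = C * C ^ n.toNat := by rw [pow_succ]; ring
      have h4 : 1 ≤ C ^ n.toNat := Nat.one_le_pow _ _ (by omega)
      have h5 : (C - 2) * C ^ n.toNat + 2 * C ^ n.toNat = C * C ^ n.toNat := by
        have hcc : C - 2 + 2 = C := by omega
        rw [← Nat.add_mul, hcc]
      calc mu n (childrenB C n 1 1 1) + 1
          ≤ (C - 2) * C ^ n.toNat + 1 := by omega
        _ ≤ (C - 2) * C ^ n.toNat + 2 * C ^ n.toNat := by omega
        _ = C * C ^ n.toNat := h5
        _ = C ^ (n.toNat + 1) := h3.symm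
    rw [hstep, bLoop_spec n _ _ [] hinv hmu]
    simp
  rw [hA, hB]
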